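-- pv_equiv track=rewrite | github.com/KarlVerdad/CS199-Semionline-AP | semionline_operations.py | sort_edges
-- ===== SOURCE A (Python) =====
-- def sort_edges(edges):
-- 	out = {}
-- 	for i in range(1, 101):
-- 		for j in range(len(edges)):
-- 			if edges[j] == i:
-- 				if not i in out:
-- 					out[i] = []
-- 				out[i].append(j)
-- 	return out
-- ===== SOURCE B (Python) =====
-- def sort_edges(edges):
--     buckets = {}
--     for j, v in enumerate(edges):
--         if 1 <= v <= 100:
--             buckets[v] = buckets.get(v, []) + [j]
--     return {k: buckets[k] for k in sorted(buckets)}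
-- ===== Notes on version B (the rewrite author's own statement) =====
-- stated objective: faster
-- what changed: A scans the whole edge list once for each candidate value 1..100 (100 passes); B groups indices into buckets in a single pass over the list and then emits the buckets in sorted key order.
import Mathlib
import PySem

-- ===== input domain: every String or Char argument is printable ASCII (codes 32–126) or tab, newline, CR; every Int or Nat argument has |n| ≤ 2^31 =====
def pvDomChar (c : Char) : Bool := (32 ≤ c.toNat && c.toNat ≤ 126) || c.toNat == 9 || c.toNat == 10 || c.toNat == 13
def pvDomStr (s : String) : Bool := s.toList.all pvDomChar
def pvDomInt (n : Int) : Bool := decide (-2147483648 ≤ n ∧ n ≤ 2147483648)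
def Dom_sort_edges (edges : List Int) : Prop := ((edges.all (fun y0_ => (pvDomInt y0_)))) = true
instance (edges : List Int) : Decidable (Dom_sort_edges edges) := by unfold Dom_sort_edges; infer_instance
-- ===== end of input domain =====

-- B replaces A's 100 scans of the list (one scan per candidate value) by a single grouping
-- pass over the list followed by emitting the buckets in sorted key order (objective: faster).

-- ===== PORT A =====
def sort_edges (edges : List Int) : List (Int × List Int) :=
  ((PySem.List.pyRange 1 101 1).foldl (fun out i =>
    (PySem.List.pyRange 0 (edges.length : Int) 1).foldl (fun out j =>
      if PySem.List.pyGetD edges j 0 == i then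
        let out' := if out.contains i then out else out.insert i ([] : List Int)
        out'.modify i [] (fun l => l ++ [j])
      else out) out) PySem.Dict.empty).items

-- ===== PORT B =====
def sort_edges_alt (edges : List Int) : List (Int × List Int) :=
  let buckets := (PySem.List.enumerate edges 0).foldl
    (fun b p => if 1 ≤ p.2 ∧ p.2 ≤ 100 then b.modify p.2 [] (fun l => l ++ [p.1]) else b)
    PySem.Dict.empty
  (PySem.List.sorted buckets.keys (fun k => k) false).map (fun k => (k, buckets.getD k []))

-- ===== PRECONDITION & SPEC =====
def Spec_sort_edges (edges : List Int) (out : List (Int × List Int)) : Prop := out = sort_edges_alt edges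
instance (edges : List Int) (out : List (Int × List Int)) : Decidable (Spec_sort_edges edges out) := by unfold Spec_sort_edges; infer_instance

-- ===== CLAIM (what is proved, stated in full; the proofs are below) =====
def Claim_equal_sort_edges : Prop := ∀ (edges : List Int), Dom_sort_edges edges → Spec_sort_edges edges (sort_edges edges)

-- ===== LEMMAS AND PROOFS =====

-- index/value pairs of edges whose value is i, and those indices
def pvMatches (edges : List Int) (i : Int) : List (Int × Int) :=
  (PySem.List.enumerate edges 0).filter (fun p => p.2 == i)
def pvIdxs (edges : List Int) (i : Int) : List Int := (pvMatches edges i).map (·.1)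

-- A's inner-loop step ("insert [] if absent, then append j") collapses to a single insert
theorem pv_step_collapse (out : PySem.Dict Int (List Int)) (i j : Int) :
    (let out' := if out.contains i then out else out.insert i ([] : List Int)
     out'.modify i [] (fun l => l ++ [j])) = out.insert i (out.getD i [] ++ [j]) := by
  by_cases h : out.contains i = true
  · simp [h, PySem.Dict.modify]
  · simp only [Bool.not_eq_true] at h
    simp [h, PySem.Dict.modify, PySem.Dict.getD_insert_self, PySem.Dict.insert_insert_self,
      PySem.Dict.getD_of_not_contains]

-- A's inner loop over the (index, value) pairs, with the collapsed step
theorem pv_inner (i : Int) (ps : List (Int × Int)) (d : PySem.Dict Int (List Int)) :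
    ps.foldl (fun out p => if p.2 == i then out.insert i (out.getD i [] ++ [p.1]) else out) d
    = if (ps.filter (fun p => p.2 == i)) = [] then d
      else d.insert i (d.getD i [] ++ ((ps.filter (fun p => p.2 == i)).map (·.1))) := by
  induction ps generalizing d with
  | nil => simp
  | cons p rest ih =>
    by_cases hp : (p.2 == i) = true
    · simp only [List.foldl_cons, List.filter_cons, hp, if_pos, ih]
      by_cases hr : (rest.filter (fun p => p.2 == i)) = []
      · simp [hr]
      · simp [hr, PySem.Dict.getD_insert_self, PySem.Dict.insert_insert_self, List.append_assoc]
    · simp only [List.foldl_cons, List.filter_cons, hp, if_neg, Bool.false_eq_true, not_false_iff, ih]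

-- A's outer loop over distinct fresh candidate values appends one bucket per occurring value
theorem pv_outer (edges : List Int) (is : List Int) (d : PySem.Dict Int (List Int))
    (hnd : is.Nodup) (hfresh : ∀ i ∈ is, d.contains i = false) :
    (is.foldl (fun out i =>
      if pvMatches edges i = [] then out
      else out.insert i (out.getD i [] ++ pvIdxs edges i)) d).items
    = d.items ++ (is.filter (fun i => !decide (pvMatches edges i = []))).map
        (fun i => (i, pvIdxs edges i)) := by
  induction is generalizing d with
  | nil => simp
  | cons i rest ih =>
    simp only [List.foldl_cons, List.filter_cons]
    have hdi : d.contains i = false := hfresh i (by simp)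
    have hnd' : rest.Nodup := hnd.of_cons
    have hni : i ∉ rest := by simpa using (List.nodup_cons.mp hnd).1
    by_cases hm : pvMatches edges i = []
    · rw [if_pos hm, ih d hnd' (fun x hx => hfresh x (List.mem_cons_of_mem _ hx))]
      simp [hm]
    · rw [if_neg hm]
      rw [ih _ hnd' (fun x hx => by
        rw [PySem.Dict.contains_insert]
        have : (x == i) = false := by simp only [beq_eq_false_iff_ne]; exact fun h => hni (h ▸ hx)
        simp [this, hfresh x (List.mem_cons_of_mem _ hx)])]
      rw [PySem.Dict.items_insert_of_not_contains _ _ hdi]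
      rw [PySem.Dict.getD_of_not_contains]
      · simp [hm]
      · exact hdi

-- characterisation of A's result
theorem pv_A_char (edges : List Int) :
    sort_edges edges
    = ((PySem.List.pyRange 1 101 1).filter (fun i => !decide (pvMatches edges i = []))).map
        (fun i => (i, pvIdxs edges i)) := by
  unfold sort_edges
  have hfun : (fun (out : PySem.Dict Int (List Int)) (i : Int) =>
      (PySem.List.pyRange 0 (edges.length : Int) 1).foldl (fun out j =>
        if PySem.List.pyGetD edges j 0 == i then
          let out' := if out.contains i then out else out.insert i ([] : List Int)
          out'.modify i [] (fun l => l ++ [j])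
        else out) out)
    = (fun out i => if pvMatches edges i = [] then out
        else out.insert i (out.getD i [] ++ pvIdxs edges i)) := by
    funext out i
    have hb : (fun (out : PySem.Dict Int (List Int)) (j : Int) =>
        if PySem.List.pyGetD edges j 0 == i then
          let out' := if out.contains i then out else out.insert i ([] : List Int)
          out'.modify i [] (fun l => l ++ [j])
        else out)
      = fun out j => if PySem.List.pyGetD edges j 0 == i then out.insert i (out.getD i [] ++ [j]) else out := by
      funext out j
      by_cases hj : (PySem.List.pyGetD edges j 0 == i) = true
      · simp only [hj, if_pos]; exact pv_step_collapse out i j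
      · simp [hj]
    rw [hb]
    have he : (PySem.List.enumerate edges 0).foldl
        (fun out p => if p.2 == i then out.insert i (out.getD i [] ++ [p.1]) else out) out
        = (PySem.List.pyRange 0 (edges.length : Int) 1).foldl
            (fun out j => if PySem.List.pyGetD edges j 0 == i then out.insert i (out.getD i [] ++ [j]) else out) out := by
      rw [PySem.List.enumerate_eq_map_pyRange (d := 0), List.foldl_map]
      simp [PySem.List.len_eq]
    rw [← he, pv_inner]
    rfl
  rw [hfun, pv_outer edges _ _ (PySem.List.nodup_pyRange_one 1 101) (by simp)]
  have h0 : (PySem.Dict.empty : PySem.Dict Int (List Int)).items = [] := rfl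
  rw [h0, List.nil_append]

-- B's buckets, and as a fold over the filtered, swapped pair list
def pvL (edges : List Int) : List (Int × Int) :=
  ((PySem.List.enumerate edges 0).filter (fun p => decide (1 ≤ p.2 ∧ p.2 ≤ 100))).map
    (fun p => (p.2, p.1))
def pvBuckets (edges : List Int) : PySem.Dict Int (List Int) :=
  (PySem.List.enumerate edges 0).foldl
    (fun b p => if 1 ≤ p.2 ∧ p.2 ≤ 100 then b.modify p.2 [] (fun l => l ++ [p.1]) else b)
    PySem.Dict.empty

theorem pv_foldl_filter {α β : Type} (p : α → Bool) (f : β → α → β) (l : List α) (init : β) :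
    (l.filter p).foldl f init = l.foldl (fun acc x => if p x then f acc x else acc) init := by
  induction l generalizing init with
  | nil => rfl
  | cons x xs ih =>
    by_cases hx : p x = true
    · simp [hx, ih]
    · simp [hx, ih]

theorem pv_buckets_eq (edges : List Int) :
    pvBuckets edges
    = (pvL edges).foldl (fun d p => d.modify p.1 [] (fun l => l ++ [p.2])) PySem.Dict.empty := by
  unfold pvBuckets pvL
  rw [List.foldl_map, pv_foldl_filter]
  apply PySem.List.foldl_congr_mem'
  intro x _ acc
  by_cases hx : 1 ≤ x.2 ∧ x.2 ≤ 100
  · simp [hx]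
  · simp [hx]

theorem pv_buckets_keys (edges : List Int) :
    (pvBuckets edges).keys = PySem.Set.ofList ((pvL edges).map (·.1)) := by
  rw [pv_buckets_eq, PySem.Dict.keys_foldl_modify_key]
  simp [PySem.Set.update_nil_left]

theorem pv_nodup_keys (edges : List Int) : (pvBuckets edges).keys.Nodup := by
  rw [pv_buckets_keys]; exact PySem.Set.nodup_ofList _

theorem pv_buckets_getD (edges : List Int) (k : Int) (hk : 1 ≤ k ∧ k ≤ 100) :
    (pvBuckets edges).getD k [] = pvIdxs edges k := by
  rw [pv_buckets_eq, PySem.Dict.getD_foldl_modify_append]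
  unfold pvL pvIdxs pvMatches
  rw [List.filter_map, List.map_map, List.filter_filter]
  simp only [PySem.Dict.getD_empty, List.nil_append]
  congr 1
  apply List.filter_congr
  intro p _
  by_cases hp : (p.2 == k) = true
  · have : 1 ≤ p.2 ∧ p.2 ≤ 100 := by
      have := eq_of_beq hp; omega
    simp [hp, Function.comp, this]
  · simp [hp, Function.comp]

theorem pv_mem_keys (edges : List Int) (i : Int) :
    i ∈ (pvBuckets edges).keys ↔ ((1 ≤ i ∧ i ≤ 100) ∧ ¬ pvMatches edges i = []) := by
  rw [pv_buckets_keys, PySem.Set.mem_ofList]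
  unfold pvL pvMatches
  simp only [List.map_map, List.mem_map, List.mem_filter, Function.comp]
  constructor
  · rintro ⟨p, ⟨hp, hq⟩, rfl⟩
    refine ⟨by simpa using hq, ?_⟩
    simp only [List.filter_eq_nil_iff, not_forall]
    exact ⟨p, hp, by simp⟩
  · rintro ⟨hr, hm⟩
    simp only [List.filter_eq_nil_iff, not_forall] at hm
    obtain ⟨p, hp, hpe⟩ := hm
    have : p.2 = i := by simpa using not_not.mp hpe
    exact ⟨p, ⟨hp, by simp [this]; omega⟩, this⟩

theorem pv_sorted_keys (edges : List Int) :
    PySem.List.sorted (pvBuckets edges).keys (fun k => k) false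
    = (PySem.List.pyRange 1 101 1).filter (fun i => decide (i ∈ (pvBuckets edges).keys)) := by
  apply PySem.List.sorted_eq_of_perm_of_pairwise_lt
  · apply (List.perm_ext_iff_of_nodup _ (pv_nodup_keys edges)).mpr
    · intro a
      simp only [List.mem_filter, PySem.List.mem_pyRange_one, decide_eq_true_eq]
      constructor
      · rintro ⟨-, h⟩; exact h
      · intro h
        rcases (pv_mem_keys edges a).mp h with ⟨hr, -⟩
        exact ⟨⟨hr.1, by omega⟩, h⟩
    · exact (PySem.List.nodup_pyRange_one 1 101).filter _
  · exact (PySem.List.pairwise_lt_pyRange_one 1 101).filter _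

-- ===== VERDICT (by name: the statement is the Claim_ definition above) =====
theorem sort_edges_spec : Claim_equal_sort_edges := by
  intro edges _
  unfold Spec_sort_edges
  have hB : sort_edges_alt edges
      = (PySem.List.sorted (pvBuckets edges).keys (fun k => k) false).map
          (fun k => (k, (pvBuckets edges).getD k [])) := rfl
  rw [pv_A_char, hB, pv_sorted_keys]
  have hf : ∀ i ∈ PySem.List.pyRange 1 101 1,
      (!decide (pvMatches edges i = [])) = (decide (i ∈ (pvBuckets edges).keys)) := by
    intro i hi
    rcases (PySem.List.mem_pyRange_one).mp hi with ⟨h1, h2⟩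
    rw [← decide_not, decide_eq_decide]
    rw [pv_mem_keys]
    constructor
    · intro h; exact ⟨⟨h1, by omega⟩, h⟩
    · rintro ⟨-, h⟩; exact h
  rw [List.filter_congr hf]
  apply List.map_congr_left
  intro k hk
  rcases List.mem_filter.mp hk with ⟨-, hmem⟩
  have hkk : k ∈ (pvBuckets edges).keys := by simpa using hmem
  rcases (pv_mem_keys edges k).mp hkk with ⟨hr, -⟩
  rw [pv_buckets_getD edges k hr]
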